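-- pv_equiv track=rewrite | github.com/Solders-Girdles/GPT-Trader | scripts/analysis/test_categorizer.py | categorize_tests
-- ===== SOURCE A (Python) =====
-- from collections import defaultdict
--
-- def categorize_tests(
--     tests_to_modules: dict[str, list[str]],
--     category_map: dict[str, set[str]],
-- ) -> dict[str, set[str]]:
--     categorized: dict[str, set[str]] = defaultdict(set)
--
--     for test_path, modules in tests_to_modules.items():
--         assigned = False
--         module_set = set(modules)
--         for category, prefixes in category_map.items():
--             if any(any(mod.startswith(prefix) for prefix in prefixes) for mod in module_set):
--                 categorized[category].add(test_path)
--                 assigned = True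
--         if not assigned:
--             categorized["uncategorized"].add(test_path)
--     return categorized
-- ===== SOURCE B (Python) =====
-- def categorize_tests(
--     tests_to_modules: dict[str, list[str]],
--     category_map: dict[str, set[str]],
-- ) -> dict[str, set[str]]:
--     # Invert the category map once: prefix -> categories owning that prefix.
--     prefix_to_cats: dict[str, set[str]] = {}
--     for category, prefixes in category_map.items():
--         for prefix in prefixes:
--             prefix_to_cats.setdefault(prefix, set()).add(category)
--
--     categorized: dict[str, set[str]] = {}
--     for test_path, modules in tests_to_modules.items():
--         # Collect every category whose prefix is a prefix of some module,
--         # by looking up each prefix of each module in the inverted map.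
--         hit: set[str] = set()
--         for mod in modules:
--             for i in range(len(mod) + 1):
--                 hit |= prefix_to_cats.get(mod[:i], set())
--         cats = [c for c in category_map if c in hit]
--         if not cats:
--             cats = ["uncategorized"]
--         for c in cats:
--             categorized.setdefault(c, set()).add(test_path)
--     return categorized
-- ===== Notes on version B (the rewrite author's own statement) =====
-- stated objective: faster
-- what changed: Instead of testing every category's every prefix with startswith against every module per test, B inverts category_map once into a prefix->categories hash map and, per module, looks up each of its len(mod)+1 prefixes, so the per-test scan over all categories and prefixes disappears.
import Mathlib
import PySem

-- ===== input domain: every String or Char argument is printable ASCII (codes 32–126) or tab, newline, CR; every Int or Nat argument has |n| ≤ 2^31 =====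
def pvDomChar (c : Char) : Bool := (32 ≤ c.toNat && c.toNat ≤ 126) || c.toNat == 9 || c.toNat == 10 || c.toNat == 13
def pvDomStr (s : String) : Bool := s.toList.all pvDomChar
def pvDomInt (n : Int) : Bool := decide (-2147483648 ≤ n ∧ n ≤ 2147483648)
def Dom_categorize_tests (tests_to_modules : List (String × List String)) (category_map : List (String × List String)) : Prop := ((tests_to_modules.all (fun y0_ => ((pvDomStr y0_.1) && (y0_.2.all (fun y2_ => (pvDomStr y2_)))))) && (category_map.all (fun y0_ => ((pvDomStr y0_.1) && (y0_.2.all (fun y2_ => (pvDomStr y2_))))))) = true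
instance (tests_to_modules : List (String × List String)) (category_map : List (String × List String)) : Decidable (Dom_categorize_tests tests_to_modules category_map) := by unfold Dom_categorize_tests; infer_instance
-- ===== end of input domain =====

-- B replaces A's per-test scan over every category's every prefix by one inverted
-- prefix->categories dictionary looked up at each prefix of each module (objective: faster).


-- ===== PORT A =====
def categorize_tests (tests_to_modules : List (String × List String)) (category_map : List (String × List String)) : List (String × List String) :=
  (tests_to_modules.foldl (fun (categorized : PySem.Dict String (PySem.Set String)) tm =>
      let module_set : PySem.Set String := PySem.Set.ofList tm.2
      let st := category_map.foldl (fun (st : PySem.Dict String (PySem.Set String) × Bool) cp =>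
          if module_set.any (fun m => cp.2.any (fun p => PySem.Str.startswith m p)) then
            (st.1.modify cp.1 PySem.Set.empty (fun s => PySem.Set.add s tm.1), true)
          else st)
        (categorized, false)
      if st.2 then st.1
      else st.1.modify "uncategorized" PySem.Set.empty (fun s => PySem.Set.add s tm.1))
    PySem.Dict.empty).items

-- ===== PORT B =====
def categorize_tests_alt (tests_to_modules : List (String × List String)) (category_map : List (String × List String)) : List (String × List String) :=
  let prefix_to_cats : PySem.Dict String (PySem.Set String) :=
    category_map.foldl (fun d cp =>
        cp.2.foldl (fun d p => d.modify p PySem.Set.empty (fun s => PySem.Set.add s cp.1)) d)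
      PySem.Dict.empty
  (tests_to_modules.foldl (fun (categorized : PySem.Dict String (PySem.Set String)) tm =>
      let hit : PySem.Set String := tm.2.foldl (fun h m =>
          (PySem.List.pyRange 0 ((PySem.Str.len m : Int) + 1) 1).foldl (fun h i =>
              PySem.Set.union h (prefix_to_cats.getD (PySem.Str.slice m none (some i)) PySem.Set.empty)) h)
        PySem.Set.empty
      let cats := (category_map.map Prod.fst).filter (fun c => PySem.Set.contains hit c)
      let cats := if cats.isEmpty then ["uncategorized"] else cats
      cats.foldl (fun d c => d.modify c PySem.Set.empty (fun s => PySem.Set.add s tm.1)) categorized)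
    PySem.Dict.empty).items

-- ===== PRECONDITION & SPEC =====
-- Pre_ requires the keys of category_map to be pairwise distinct: the Python argument is a dict,
-- whose keys are necessarily distinct, so duplicate-key association lists represent no Python input.
def Pre_categorize_tests (tests_to_modules : List (String × List String)) (category_map : List (String × List String)) : Prop :=
  (category_map.map Prod.fst).Nodup
instance (tests_to_modules : List (String × List String)) (category_map : List (String × List String)) : Decidable (Pre_categorize_tests tests_to_modules category_map) := by unfold Pre_categorize_tests; infer_instance
def pvWitness_categorize_tests : (List (String × List String)) × (List (String × List String)) :=
  ([("tests/test_core.py", ["core.engine", "util"]), ("tests/test_misc.py", ["misc"])],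
   [("core", ["core."]), ("util", ["util", "core.engine"])])
def Spec_categorize_tests (tests_to_modules : List (String × List String)) (category_map : List (String × List String)) (out : List (String × List String)) : Prop := out = categorize_tests_alt tests_to_modules category_map
instance (tests_to_modules : List (String × List String)) (category_map : List (String × List String)) (out : List (String × List String)) : Decidable (Spec_categorize_tests tests_to_modules category_map out) := by unfold Spec_categorize_tests; infer_instance

-- ===== CLAIM (what is proved, stated in full; the proofs are below) =====
def Claim_equal_categorize_tests : Prop := ∀ (tests_to_modules : List (String × List String)) (category_map : List (String × List String)), Dom_categorize_tests tests_to_modules category_map → Pre_categorize_tests tests_to_modules category_map → Spec_categorize_tests tests_to_modules category_map (categorize_tests tests_to_modules category_map)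

-- ===== LEMMAS AND PROOFS =====


def pvP2C (category_map : List (String × List String)) : PySem.Dict String (PySem.Set String) :=
  category_map.foldl (fun d cp =>
      cp.2.foldl (fun d p => d.modify p PySem.Set.empty (fun s => PySem.Set.add s cp.1)) d)
    PySem.Dict.empty

lemma pvAny_ofList (l : List String) (f : String → Bool) :
    (PySem.Set.ofList l).any f = l.any f := by
  rw [Bool.eq_iff_iff]
  simp [List.any_eq_true, PySem.Set.mem_ofList]

def pvMatch (modules : List String) (cp : String × List String) : Bool :=
  modules.any (fun m => cp.2.any (fun p => PySem.Str.startswith m p))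

lemma pvMem_inner (c : String) (p : String) (cat : String) (ps : List String)
    (d : PySem.Dict String (PySem.Set String)) :
    c ∈ (ps.foldl (fun d p => d.modify p PySem.Set.empty (fun s => PySem.Set.add s cat)) d).getD p PySem.Set.empty ↔
      c ∈ d.getD p PySem.Set.empty ∨ (c = cat ∧ p ∈ ps) := by
  induction ps generalizing d with
  | nil => simp
  | cons q ps ih =>
    simp only [List.foldl_cons, ih, PySem.Dict.getD_modify, List.mem_cons]
    by_cases h : p = q <;> simp [h] <;> tauto

lemma pvMem_p2c_aux (cmap : List (String × List String)) (c p : String)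
    (d : PySem.Dict String (PySem.Set String)) :
    c ∈ (cmap.foldl (fun d cp =>
        cp.2.foldl (fun d p => d.modify p PySem.Set.empty (fun s => PySem.Set.add s cp.1)) d) d).getD p PySem.Set.empty ↔
      c ∈ d.getD p PySem.Set.empty ∨ ∃ cp ∈ cmap, cp.1 = c ∧ p ∈ cp.2 := by
  induction cmap generalizing d with
  | nil => simp
  | cons cp rest ih =>
    simp only [List.foldl_cons, ih, pvMem_inner, List.mem_cons]
    constructor
    · rintro (((h | ⟨rfl, hp⟩) | h))
      · tauto
      · exact Or.inr ⟨cp, Or.inl rfl, rfl, hp⟩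
      · obtain ⟨cq, hq, hh⟩ := h; exact Or.inr ⟨cq, Or.inr hq, hh⟩
    · rintro (h | ⟨cq, (rfl | hq), hh⟩)
      · tauto
      · exact Or.inl (Or.inr ⟨hh.1.symm, hh.2⟩)
      · exact Or.inr ⟨cq, hq, hh⟩

lemma pvMem_p2c (category_map : List (String × List String)) (c p : String) :
    c ∈ (pvP2C category_map).getD p PySem.Set.empty ↔
      ∃ cp ∈ category_map, cp.1 = c ∧ p ∈ cp.2 := by
  rw [pvP2C, pvMem_p2c_aux]; simp

lemma pvMem_foldl_union {α κ : Type} [BEq κ] [LawfulBEq κ] (l : List α) (g : α → PySem.Set κ)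
    (h : PySem.Set κ) (c : κ) :
    c ∈ l.foldl (fun h x => PySem.Set.union h (g x)) h ↔ c ∈ h ∨ ∃ x ∈ l, c ∈ g x := by
  induction l generalizing h with
  | nil => simp
  | cons x l ih => simp [List.foldl_cons, ih, PySem.Set.mem_union]; tauto

lemma pvStartswith_iff_slice (m p : String) :
    (∃ i, i ∈ PySem.List.pyRange 0 ((PySem.Str.len m : Int) + 1) 1 ∧
        PySem.Str.slice m none (some i) = p) ↔ PySem.Str.startswith m p = true := by
  rw [PySem.Str.startswith_eq, PySem.Chars.startswith_iff]
  constructor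
  · rintro ⟨i, hi, hs⟩
    rw [PySem.List.mem_pyRange_one] at hi
    have hp : p.toList = m.toList.take i.toNat := by
      rw [← hs, PySem.Str.toList_slice, PySem.Chars.slice_eq_listSlice,
        PySem.List.slice_to _ hi.1]
    rw [hp]; exact List.take_prefix _ _
  · intro hp
    refine ⟨(p.toList.length : Int), ?_, ?_⟩
    · rw [PySem.List.mem_pyRange_one]
      have := hp.length_le
      simp [PySem.Str.len_eq] at *
      omega
    · apply String.toList_inj.mp
      rw [PySem.Str.toList_slice, PySem.Chars.slice_eq_listSlice,
        PySem.List.slice_to _ (by positivity)]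
      simp
      exact (List.prefix_iff_eq_take.mp hp).symm

def pvHit (category_map : List (String × List String)) (modules : List String) : PySem.Set String :=
  modules.foldl (fun h m =>
      (PySem.List.pyRange 0 ((PySem.Str.len m : Int) + 1) 1).foldl (fun h i =>
          PySem.Set.union h ((pvP2C category_map).getD (PySem.Str.slice m none (some i)) PySem.Set.empty)) h)
    PySem.Set.empty

lemma pvMem_hit (category_map : List (String × List String)) (modules : List String) (c : String) :
    c ∈ pvHit category_map modules ↔ ∃ cp ∈ category_map, cp.1 = c ∧ pvMatch modules cp = true := by
  have aux : ∀ h, c ∈ modules.foldl (fun h m =>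
      (PySem.List.pyRange 0 ((PySem.Str.len m : Int) + 1) 1).foldl (fun h i =>
          PySem.Set.union h ((pvP2C category_map).getD (PySem.Str.slice m none (some i)) PySem.Set.empty)) h) h ↔
      c ∈ h ∨ ∃ m ∈ modules, ∃ i ∈ PySem.List.pyRange 0 ((PySem.Str.len m : Int) + 1) 1,
        c ∈ (pvP2C category_map).getD (PySem.Str.slice m none (some i)) PySem.Set.empty := by
    induction modules with
    | nil => simp
    | cons m ms ih =>
      intro h
      simp only [List.foldl_cons, ih, pvMem_foldl_union, List.mem_cons, exists_eq_or_imp]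
      exact or_assoc
  rw [pvHit, aux]
  have h0 : c ∈ (PySem.Set.empty : PySem.Set String) ↔ False := by simp [PySem.Set.empty]
  simp only [pvMem_p2c, pvMatch, List.any_eq_true, h0, false_or]
  constructor
  · rintro ⟨m, hm, i, hi, cp, hcp, rfl, hps⟩
    exact ⟨cp, hcp, rfl, m, hm, _, hps, (pvStartswith_iff_slice m _).mp ⟨i, hi, rfl⟩⟩
  · rintro ⟨cp, hcp, rfl, m, hm, p, hp, hsw⟩
    obtain ⟨i, hi, hs⟩ := (pvStartswith_iff_slice m p).mpr hsw
    exact ⟨m, hm, i, hi, cp, hcp, rfl, hs ▸ hp⟩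

lemma pvA_inner (category_map : List (String × List String)) (t : String) (modules : List String)
    (d : PySem.Dict String (PySem.Set String)) (b : Bool) :
    category_map.foldl (fun (st : PySem.Dict String (PySem.Set String) × Bool) cp =>
        if pvMatch modules cp then
          (st.1.modify cp.1 PySem.Set.empty (fun s => PySem.Set.add s t), true)
        else st) (d, b) =
      (((category_map.filter (pvMatch modules)).map Prod.fst).foldl
          (fun d c => d.modify c PySem.Set.empty (fun s => PySem.Set.add s t)) d,
        b || !((category_map.filter (pvMatch modules)).map Prod.fst).isEmpty) := by
  induction category_map generalizing d b with
  | nil => simp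
  | cons cp rest ih =>
    by_cases h : pvMatch modules cp
    · simp only [List.foldl_cons, List.filter_cons, h, if_true, ih, List.map_cons,
        List.isEmpty_cons]
      simp
    · simp only [List.foldl_cons, List.filter_cons, h, Bool.false_eq_true, if_false, ih]

lemma pvCats_eq (category_map : List (String × List String)) (modules : List String)
    (hnd : (category_map.map Prod.fst).Nodup) :
    (category_map.map Prod.fst).filter (fun c => PySem.Set.contains (pvHit category_map modules) c) =
      (category_map.filter (pvMatch modules)).map Prod.fst := by
  rw [List.filter_map]
  congr 1
  apply List.filter_congr
  intro cp hcp
  rw [Bool.eq_iff_iff]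
  simp only [Function.comp_apply, PySem.Set.contains_iff, pvMem_hit]
  constructor
  · rintro ⟨cq, hq, he, hm⟩
    have := List.inj_on_of_nodup_map hnd hq hcp he
    rwa [this] at hm
  · intro hm
    exact ⟨cp, hcp, rfl, hm⟩

lemma pvMatch_def (modules : List String) (cp : String × List String) :
    modules.any (fun m => cp.2.any (fun p => PySem.Str.startswith m p)) = pvMatch modules cp := rfl

lemma pvMatch_ofList (l : List String) (cp : String × List String) :
    pvMatch (PySem.Set.ofList l) cp = pvMatch l cp := pvAny_ofList l _

lemma pvP2C_def (category_map : List (String × List String)) :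
    category_map.foldl (fun d cp =>
        cp.2.foldl (fun d p => d.modify p PySem.Set.empty (fun s => PySem.Set.add s cp.1)) d)
      PySem.Dict.empty = pvP2C category_map := rfl

lemma pvHit_def (category_map : List (String × List String)) (modules : List String) :
    modules.foldl (fun h m =>
        (PySem.List.pyRange 0 ((PySem.Str.len m : Int) + 1) 1).foldl (fun h i =>
            PySem.Set.union h ((pvP2C category_map).getD (PySem.Str.slice m none (some i)) PySem.Set.empty)) h)
      PySem.Set.empty = pvHit category_map modules := rfl

-- ===== VERDICT (by name: the statement is the Claim_ definition above) =====
theorem categorize_tests_spec : Claim_equal_categorize_tests := by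
  intro tests cmap _ hnd
  unfold Spec_categorize_tests
  unfold categorize_tests categorize_tests_alt
  congr 1
  apply PySem.List.foldl_congr_mem
  intro d tm _
  dsimp only
  simp only [pvMatch_def, pvMatch_ofList, pvP2C_def, pvHit_def, pvA_inner, pvCats_eq _ _ hnd,
    Bool.false_or]
  by_cases hm : (List.map Prod.fst (List.filter (pvMatch tm.2) cmap)).isEmpty
  · rw [List.isEmpty_iff] at hm
    simp [hm]
  · simp [hm]
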